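-- pv_equiv track=rewrite | github.com/ext-maru/ai-co | elders_guild/elder_tree/elder_servants/dwarf_tribe/tools/quality/aggressive-long-line-fix.py | _fix_string_concat
-- ===== SOURCE A (Python) =====
-- def _fix_string_concat(line: str, indent: str) -> list:
--     """文字列連結修正"""
--     stripped = line.strip()
--
--     if ' + ' in stripped:
--         parts = [p.strip() for p in stripped.split(' + ')]
--         if len(parts) > 1:
--             result = []
--             for i, part in enumerate(parts):
--                 if i == 0:
--                     result.append(f'{indent}{part} + \\\n')
--                 elif i == len(parts) - 1:
--                     result.append(f'{indent}    {part}\n')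
--                 else:
--                     result.append(f'{indent}    {part} + \\\n')
--             return result
--
--     return [line]
-- ===== SOURCE B (Python) =====
-- def _fix_string_concat(line: str, indent: str) -> list:
--     stripped = line.strip()
--     if ' + ' in stripped:
--         parts = [p.strip() for p in stripped.split(' + ')]
--         if len(parts) > 1:
--             return [f'{indent}{parts[0]} + \\\n'] + _build_tail(indent, parts[1], parts[2:])
--     return [line]
--
--
-- def _build_tail(indent, first, rest):
--     if not rest:
--         return [f'{indent}    {first}\n']
--     return [f'{indent}    {first} + \\\n'] + _build_tail(indent, rest[0], rest[1:])
-- ===== Notes on version B (the rewrite author's own statement) =====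
-- stated objective: alternative
-- what changed: Replaces the enumerate-indexed loop with its three positional branches by a structural recursion: the first line is prepended and the tail of the block is built recursively, the last-part case being the recursion's base case instead of an index comparison.
import Mathlib
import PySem

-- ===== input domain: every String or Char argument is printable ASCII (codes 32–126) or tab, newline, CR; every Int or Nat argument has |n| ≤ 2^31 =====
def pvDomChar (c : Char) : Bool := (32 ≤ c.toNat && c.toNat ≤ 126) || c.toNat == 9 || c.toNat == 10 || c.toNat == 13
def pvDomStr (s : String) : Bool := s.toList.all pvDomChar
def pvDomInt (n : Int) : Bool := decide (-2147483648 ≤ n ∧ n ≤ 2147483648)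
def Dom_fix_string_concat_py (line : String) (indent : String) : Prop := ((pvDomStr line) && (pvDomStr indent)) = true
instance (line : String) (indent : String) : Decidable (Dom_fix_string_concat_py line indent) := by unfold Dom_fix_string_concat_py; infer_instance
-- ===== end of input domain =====

-- B replaces A's enumerate loop (per-index branches) with a structural recursion building the tail of the block; same return value everywhere.

-- ===== PORT A =====
def fix_string_concat_py (line : String) (indent : String) : List String :=
  let stripped := PySem.Str.strip line
  if PySem.Str.isIn " + " stripped then
    let parts := ((PySem.Str.split? stripped " + ").getD []).map PySem.Str.strip
    if 1 < parts.length then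
      (PySem.List.enumerate parts).foldl (fun res ip =>
        if ip.1 == 0 then res ++ [indent ++ ip.2 ++ " + \\\n"]
        else if ip.1 == (parts.length : Int) - 1 then res ++ [indent ++ "    " ++ ip.2 ++ "\n"]
        else res ++ [indent ++ "    " ++ ip.2 ++ " + \\\n"]) []
    else [line]
  else [line]

-- ===== PORT B =====
def buildTailB (indent : String) (first : String) (rest : List String) : List String :=
  match rest with
  | [] => [indent ++ "    " ++ first ++ "\n"]
  | r :: rs => (indent ++ "    " ++ first ++ " + \\\n") :: buildTailB indent r rs

def fix_string_concat_py_alt (line : String) (indent : String) : List String :=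
  let stripped := PySem.Str.strip line
  if PySem.Str.isIn " + " stripped then
    let parts := ((PySem.Str.split? stripped " + ").getD []).map PySem.Str.strip
    if h : 1 < parts.length then
      (indent ++ parts[0] ++ " + \\\n") :: buildTailB indent parts[1] (parts.drop 2)
    else [line]
  else [line]

-- ===== PRECONDITION & SPEC =====
def Spec_fix_string_concat_py (line : String) (indent : String) (out : List String) : Prop := out = fix_string_concat_py_alt line indent
instance (line : String) (indent : String) (out : List String) : Decidable (Spec_fix_string_concat_py line indent out) := by unfold Spec_fix_string_concat_py; infer_instance

-- ===== CLAIM (what is proved, stated in full; the proofs are below) =====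
def Claim_equal_fix_string_concat_py : Prop := ∀ (line : String) (indent : String), Dom_fix_string_concat_py line indent → Spec_fix_string_concat_py line indent (fix_string_concat_py line indent)

-- ===== LEMMAS AND PROOFS =====

-- A's loop over the tail (indices i >= 1, with n the fixed length) equals B's recursive tail builder.
theorem loop_rest_eq (indent : String) (n : Int) :
    ∀ (rest : List String) (first : String) (i : Int) (acc : List String),
      1 ≤ i → i + rest.length + 1 = n →
      (PySem.List.enumerate (first :: rest) i).foldl (fun res ip =>
        if ip.1 == 0 then res ++ [indent ++ ip.2 ++ " + \\\n"]
        else if ip.1 == n - 1 then res ++ [indent ++ "    " ++ ip.2 ++ "\n"]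
        else res ++ [indent ++ "    " ++ ip.2 ++ " + \\\n"]) acc
      = acc ++ buildTailB indent first rest := by
  intro rest
  induction rest with
  | nil =>
      intro first i acc hi hn
      rw [PySem.List.enumerate_cons, PySem.List.enumerate_nil]
      have h0 : ¬ i = 0 := by omega
      have h1 : i = n - 1 := by simp only [List.length_nil, Int.natCast_zero] at hn; omega
      simp only [List.foldl_cons, List.foldl_nil, beq_iff_eq]
      rw [if_neg h0, if_pos h1]
      simp [buildTailB]
  | cons r rs ih =>
      intro first i acc hi hn
      rw [PySem.List.enumerate_cons, List.foldl_cons]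
      have h0 : ¬ i = 0 := by omega
      have h1 : ¬ i = n - 1 := by
        simp only [List.length_cons] at hn; push_cast at hn; omega
      simp only [beq_iff_eq] at ih ⊢
      rw [if_neg h0, if_neg h1]
      rw [ih r (i + 1) _ (by omega) (by simp only [List.length_cons] at hn; push_cast at hn ⊢; omega)]
      simp [buildTailB]

theorem core_eq (line indent : String) (parts : List String) :
    (if 1 < parts.length then
        (PySem.List.enumerate parts).foldl (fun res ip =>
          if ip.1 == 0 then res ++ [indent ++ ip.2 ++ " + \\\n"]
          else if ip.1 == (parts.length : Int) - 1 then res ++ [indent ++ "    " ++ ip.2 ++ "\n"]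
          else res ++ [indent ++ "    " ++ ip.2 ++ " + \\\n"]) []
      else [line])
    = (if h : 1 < parts.length then
        (indent ++ parts[0] ++ " + \\\n") :: buildTailB indent parts[1] (parts.drop 2)
      else [line]) := by
  by_cases hlen : 1 < parts.length
  · rw [if_pos hlen, dif_pos hlen]
    rcases parts with _ | ⟨p0, _ | ⟨p1, rest⟩⟩
    · simp at hlen
    · simp at hlen
    · rw [PySem.List.enumerate_cons, List.foldl_cons]
      simp only [beq_self_eq_true, if_true, List.nil_append, zero_add, beq_iff_eq]
      have hl := loop_rest_eq indent ((p0 :: p1 :: rest).length : Int) rest p1 1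
        [indent ++ p0 ++ " + \\\n"] (by omega)
        (by simp only [List.length_cons]; push_cast; ring)
      simp only [beq_iff_eq] at hl
      rw [hl]
      simp
  · rw [if_neg hlen, dif_neg hlen]

-- ===== VERDICT (by name: the statement is the Claim_ definition above) =====
set_option maxHeartbeats 1000000 in
theorem fix_string_concat_py_spec : Claim_equal_fix_string_concat_py := by
  intro line indent _
  unfold Spec_fix_string_concat_py fix_string_concat_py fix_string_concat_py_alt
  dsimp only
  by_cases hin : PySem.Str.isIn " + " (PySem.Str.strip line) = true
  · rw [if_pos hin, if_pos hin]
    exact core_eq line indent _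
  · rw [if_neg hin, if_neg hin]
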